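-- pv_equiv track=rewrite | github.com/NeilWangziyu/Leetcode_py | countSmaller.py | bisert
-- ===== SOURCE A (Python) =====
-- def bisert(tmp,t):
--     start = 0
--     end = len(tmp) - 1
--     while end >= start:
--         mid = (start + end) // 2
--         if tmp[mid] > t:
--             end = mid - 1
--         else:
--             start = mid + 1
--     index = start - 1
--     while index >= 0 and tmp[index] == t:
--             index -= 1
--     tmp.insert(index + 1,t)
--     return index + 1
-- ===== SOURCE B (Python) =====
-- def bisert(tmp, t):
--     pos = 0
--     for x in tmp:
--         if x < t:
--             pos += 1
--         else:
--             break
--     tmp.insert(pos, t)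
--     return pos
-- ===== Notes on version B (the rewrite author's own statement) =====
-- stated objective: simpler
-- what changed: A's binary search plus backward duplicate walk is replaced by a single left-to-right scan that counts elements strictly less than t and stops at the first element >= t; the insert and the return value are unchanged.
-- outside the precondition, e.g. on bisert([3, 1, 2], 2): A returns 2, B returns 0
import Mathlib
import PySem

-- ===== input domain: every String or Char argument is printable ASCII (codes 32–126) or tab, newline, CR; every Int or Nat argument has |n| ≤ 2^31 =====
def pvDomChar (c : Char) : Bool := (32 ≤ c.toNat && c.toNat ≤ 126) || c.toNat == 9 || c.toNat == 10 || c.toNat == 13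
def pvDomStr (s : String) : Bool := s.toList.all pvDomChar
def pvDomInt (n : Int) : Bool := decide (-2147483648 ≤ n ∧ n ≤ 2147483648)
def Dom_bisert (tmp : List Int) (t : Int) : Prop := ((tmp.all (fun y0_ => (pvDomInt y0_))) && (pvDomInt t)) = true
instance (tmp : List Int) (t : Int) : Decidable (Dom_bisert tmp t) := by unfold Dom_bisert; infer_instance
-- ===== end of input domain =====

-- B replaces A's binary search + backward duplicate walk by one linear scan counting
-- elements strictly below t (objective: simpler). Both Pythons also insert t into tmp at the
-- returned position (the same mutation under Pre_); the theorems are about the return value.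

-- ===== PORT A =====
-- the `while end >= start` binary-search loop; the `none` branch is an unreachable
-- IndexError guard (indices stay in range whenever the loop is entered with valid bounds)
def bisertLoop (tmp : List Int) (t : Int) : Nat → Int → Int → Int
  | 0, start, _ => start  -- fuel exhausted: never reached (fuel exceeds the loop measure)
  | fuel + 1, start, e =>
    if e ≥ start then
      let mid := PySem.Int.floordiv (start + e) 2
      match PySem.List.pyGet? tmp mid with
      | none => start
      | some v =>
        if v > t then bisertLoop tmp t fuel start (mid - 1)
        else bisertLoop tmp t fuel (mid + 1) e
    else start

-- the `while index >= 0 and tmp[index] == t` loop; `none` is again an IndexError guard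
def bisertBack (tmp : List Int) (t : Int) : Nat → Int → Int
  | 0, idx => idx  -- fuel exhausted: never reached
  | fuel + 1, idx =>
    if idx ≥ 0 then
      match PySem.List.pyGet? tmp idx with
      | none => idx
      | some v => if v = t then bisertBack tmp t fuel (idx - 1) else idx
    else idx

def bisert (tmp : List Int) (t : Int) : Int :=
  let start := bisertLoop tmp t (tmp.length + 1) 0 ((tmp.length : Int) - 1)
  let index := bisertBack tmp t (tmp.length + 1) (start - 1)
  index + 1

-- ===== PORT B =====
-- B's for-loop with break: count the strictly-smaller prefix
def altCount (t : Int) : List Int → Int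
  | [] => 0
  | x :: xs => if x < t then 1 + altCount t xs else 0

def bisert_alt (tmp : List Int) (t : Int) : Int := altCount t tmp

-- ===== PRECONDITION & SPEC =====
-- Pre_ admits nondecreasing tmp (bisert is a sorted-insert helper) and, in addition, any tmp
-- in which every element is strictly below t or every element is strictly above t (there the
-- two programs agree regardless of order); the remaining unsorted inputs are excluded because
-- A's binary-search landing spot on unsorted data is an accident of its implementation.
def sortedb : List Int → Bool
  | [] => true
  | [_] => true
  | x :: y :: ys => decide (x ≤ y) && sortedb (y :: ys)

def Pre_bisert (tmp : List Int) (t : Int) : Prop :=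
  sortedb tmp = true ∨ tmp.all (fun x => decide (x < t)) = true ∨ tmp.all (fun x => decide (t < x)) = true
instance (tmp : List Int) (t : Int) : Decidable (Pre_bisert tmp t) := by
  unfold Pre_bisert; infer_instance
def pvWitness_bisert : List Int × Int := ([-2, 1, 1, 3], 1)

def Spec_bisert (tmp : List Int) (t : Int) (out : Int) : Prop := out = bisert_alt tmp t
instance (tmp : List Int) (t : Int) (out : Int) : Decidable (Spec_bisert tmp t out) := by unfold Spec_bisert; infer_instance

-- ===== CLAIM (what is proved, stated in full; the proofs are below) =====
def Claim_equal_bisert : Prop := ∀ (tmp : List Int) (t : Int), Dom_bisert tmp t → Pre_bisert tmp t → Spec_bisert tmp t (bisert tmp t)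

-- ===== LEMMAS AND PROOFS =====

-- sortedb is exactly pairwise nondecreasing
theorem sortedb_pairwise : ∀ (l : List Int), sortedb l = true → List.Pairwise (· ≤ ·) l := by
  intro l
  induction l with
  | nil => intro _; exact List.Pairwise.nil
  | cons x xs ih =>
    intro h
    cases xs with
    | nil => simp
    | cons y ys =>
      simp only [sortedb, Bool.and_eq_true, decide_eq_true_eq] at h
      have hp := ih h.2
      refine List.Pairwise.cons ?_ hp
      intro z hz
      rcases List.mem_cons.mp hz with rfl | hz'
      · exact h.1
      · exact le_trans h.1 (List.rel_of_pairwise_cons hp hz')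

-- monotone access on a nondecreasing list
theorem sorted_getElem_le (tmp : List Int) (hs : List.Pairwise (· ≤ ·) tmp)
    {i j : Nat} (hj : j < tmp.length) (hij : i ≤ j) : tmp[i]'(by omega) ≤ tmp[j] := by
  rcases Nat.lt_or_ge i j with h | h
  · exact (List.pairwise_iff_getElem.mp hs) i j (by omega) hj h
  · have : i = j := by omega
    subst this; exact le_refl _

-- invariant of A's binary-search loop: the result S separates (≤ t) from (> t)
theorem loop_spec (tmp : List Int) (t : Int) (hs : List.Pairwise (· ≤ ·) tmp) :
    ∀ (fuel : Nat) (start e : Int), (e + 1 - start).toNat < fuel →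
    0 ≤ start → start ≤ e + 1 → e < (tmp.length : Int) →
    (∀ i : Nat, (hi : i < tmp.length) → (i : Int) < start → tmp[i] ≤ t) →
    (∀ i : Nat, (hi : i < tmp.length) → e < (i : Int) → t < tmp[i]) →
    (0 ≤ bisertLoop tmp t fuel start e ∧ bisertLoop tmp t fuel start e ≤ (tmp.length : Int) ∧
     (∀ i : Nat, (hi : i < tmp.length) → (i : Int) < bisertLoop tmp t fuel start e → tmp[i] ≤ t) ∧
     (∀ i : Nat, (hi : i < tmp.length) → bisertLoop tmp t fuel start e ≤ (i : Int) → t < tmp[i])) := by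
  intro fuel
  induction fuel with
  | zero => intro start e hk; exact absurd hk (by omega)
  | succ fuel ih =>
    intro start e hk h0 hse hlen hpre hpost
    by_cases hge : e ≥ start
    · have hmid := PySem.Int.floordiv_two_mid_bounds (show start ≤ e by omega)
      set mid := PySem.Int.floordiv (start + e) 2 with hmiddef
      have h0m : 0 ≤ mid := by omega
      have hml : mid < (tmp.length : Int) := by omega
      have hget : PySem.List.pyGet? tmp mid = some (tmp[mid.toNat]'(by omega)) :=
        PySem.List.pyGet?_eq_some_getElem tmp h0m hml
      by_cases hv : tmp[mid.toNat]'(by omega) > t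
      · have hstep : bisertLoop tmp t (fuel + 1) start e = bisertLoop tmp t fuel start (mid - 1) := by
          simp only [bisertLoop]
          rw [if_pos hge, ← hmiddef, hget]
          simp [hv]
        rw [hstep]
        exact ih start (mid - 1) (by omega) h0 (by omega) (by omega) hpre
          (by
            intro i hi hmi
            have : mid ≤ (i : Int) := by omega
            have h1 : tmp[mid.toNat]'(by omega) ≤ tmp[i] :=
              sorted_getElem_le tmp hs hi (by omega)
            omega)
      · have hstep : bisertLoop tmp t (fuel + 1) start e = bisertLoop tmp t fuel (mid + 1) e := by
          simp only [bisertLoop]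
          rw [if_pos hge, ← hmiddef, hget]
          simp [hv]
        rw [hstep]
        exact ih (mid + 1) e (by omega) (by omega) (by omega) hlen
          (by
            intro i hi hmi
            have : (i : Int) ≤ mid := by omega
            have h1 : tmp[i] ≤ tmp[mid.toNat]'(by omega) :=
              sorted_getElem_le tmp hs (by omega) (by omega)
            omega)
          hpost
    · have hstep : bisertLoop tmp t (fuel + 1) start e = start := by
        simp only [bisertLoop]
        rw [if_neg hge]
      rw [hstep]
      refine ⟨h0, by omega, hpre, ?_⟩
      intro i hi hsi
      exact hpost i hi (by omega)

-- invariant of A's backward duplicate walk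
theorem back_spec (tmp : List Int) (t : Int) (S : Int)
    (hSlen : S ≤ (tmp.length : Int)) :
    ∀ (fuel : Nat) (idx : Int), (idx + 1).toNat < fuel → -1 ≤ idx → idx < S →
    (∀ i : Nat, (hi : i < tmp.length) → idx < (i : Int) → (i : Int) < S → tmp[i] = t) →
    (bisertBack tmp t fuel idx ≤ idx ∧ -1 ≤ bisertBack tmp t fuel idx ∧
     (∀ i : Nat, (hi : i < tmp.length) → bisertBack tmp t fuel idx < (i : Int) → (i : Int) < S → tmp[i] = t) ∧
     (bisertBack tmp t fuel idx = -1 ∨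
      (0 ≤ bisertBack tmp t fuel idx ∧ bisertBack tmp t fuel idx < (tmp.length : Int) ∧
       ∀ (h : (bisertBack tmp t fuel idx).toNat < tmp.length), tmp[(bisertBack tmp t fuel idx).toNat] ≠ t))) := by
  intro fuel
  induction fuel with
  | zero => intro idx hk; exact absurd hk (by omega)
  | succ fuel ih =>
    intro idx hk hm1 h0 heq
    by_cases hge : idx ≥ 0
    · have hil : idx < (tmp.length : Int) := by omega
      have hget : PySem.List.pyGet? tmp idx = some (tmp[idx.toNat]'(by omega)) :=
        PySem.List.pyGet?_eq_some_getElem tmp hge hil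
      by_cases hv : tmp[idx.toNat]'(by omega) = t
      · have hstep : bisertBack tmp t (fuel + 1) idx = bisertBack tmp t fuel (idx - 1) := by
          simp only [bisertBack]
          rw [if_pos hge, hget]
          simp [hv]
        rw [hstep]
        obtain ⟨ha, hb, hc, hd⟩ := ih (idx - 1) (by omega) (by omega) (by omega)
          (by
            intro i hi h1 h2
            by_cases hii : idx < (i : Int)
            · exact heq i hi hii h2
            · have hie : (i : Int) = idx := by omega
              have : i = idx.toNat := by omega
              subst this; exact hv)
        exact ⟨by omega, hb, hc, hd⟩
      · have hstep : bisertBack tmp t (fuel + 1) idx = idx := by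
          simp only [bisertBack]
          rw [if_pos hge, hget]
          simp [hv]
        rw [hstep]
        exact ⟨le_refl _, by omega, heq, Or.inr ⟨hge, hil, fun _ => hv⟩⟩
    · have hstep : bisertBack tmp t (fuel + 1) idx = idx := by
        simp only [bisertBack]
        rw [if_neg hge]
      rw [hstep]
      exact ⟨le_refl _, by omega, heq, Or.inl (by omega)⟩

-- uniqueness: any separator of (< t) from (≥ t) is B's count
theorem altCount_eq (t : Int) :
    ∀ (tmp : List Int) (R : Int), 0 ≤ R → R ≤ (tmp.length : Int) →
    (∀ i : Nat, (hi : i < tmp.length) → (i : Int) < R → tmp[i] < t) →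
    (∀ i : Nat, (hi : i < tmp.length) → R ≤ (i : Int) → ¬ tmp[i] < t) →
    altCount t tmp = R := by
  intro tmp
  induction tmp with
  | nil =>
    intro R h0 hl _ _
    simp only [altCount]
    simp at hl
    omega
  | cons x xs ihx =>
    intro R h0 hl hlt hge
    by_cases hx : x < t
    · have hR1 : 1 ≤ R := by
        by_contra hc
        exact hge 0 (by simp) (by omega) hx
      have := ihx (R - 1) (by omega) (by simp at hl ⊢; omega)
        (by
          intro i hi hiR
          have := hlt (i + 1) (by simpa using Nat.succ_lt_succ hi) (by push_cast; omega)
          simpa using this)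
        (by
          intro i hi hiR
          have := hge (i + 1) (by simpa using Nat.succ_lt_succ hi) (by push_cast; omega)
          simpa using this)
      calc altCount t (x :: xs) = 1 + altCount t xs := by simp [altCount, hx]
        _ = R := by rw [this]; omega
    · have hR0 : R = 0 := by
        by_contra hc
        exact hx (hlt 0 (by simp) (by omega))
      simp [altCount, hx, hR0]
  
-- the binary-search loop when every element is strictly below t: it exits at e + 1
theorem loop_all_lt (tmp : List Int) (t : Int) (h : ∀ x ∈ tmp, x < t) :
    ∀ (fuel : Nat) (start e : Int), (e + 1 - start).toNat < fuel →
    0 ≤ start → start ≤ e + 1 → e < (tmp.length : Int) →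
    bisertLoop tmp t fuel start e = e + 1 := by
  intro fuel
  induction fuel with
  | zero => intro start e hk; exact absurd hk (by omega)
  | succ fuel ih =>
    intro start e hk h0 hse hlen
    by_cases hge : e ≥ start
    · have hmid := PySem.Int.floordiv_two_mid_bounds (show start ≤ e by omega)
      set mid := PySem.Int.floordiv (start + e) 2 with hmiddef
      have hget : PySem.List.pyGet? tmp mid = some (tmp[mid.toNat]'(by omega)) :=
        PySem.List.pyGet?_eq_some_getElem tmp (by omega) (by omega)
      have hv : ¬ tmp[mid.toNat]'(by omega) > t := by
        have := h _ (List.getElem_mem (l := tmp) (n := mid.toNat) (h := by omega))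
        omega
      have hstep : bisertLoop tmp t (fuel + 1) start e = bisertLoop tmp t fuel (mid + 1) e := by
        simp only [bisertLoop]
        rw [if_pos hge, ← hmiddef, hget]
        simp [hv]
      rw [hstep]
      exact ih (mid + 1) e (by omega) (by omega) (by omega) hlen
    · have hstep : bisertLoop tmp t (fuel + 1) start e = start := by
        simp only [bisertLoop]
        rw [if_neg hge]
      rw [hstep]; omega

-- the binary-search loop when every element is strictly above t: it exits at start
theorem loop_all_gt (tmp : List Int) (t : Int) (h : ∀ x ∈ tmp, t < x) :
    ∀ (fuel : Nat) (start e : Int), (e + 1 - start).toNat < fuel →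
    0 ≤ start → e < (tmp.length : Int) →
    bisertLoop tmp t fuel start e = start := by
  intro fuel
  induction fuel with
  | zero => intro start e hk; exact absurd hk (by omega)
  | succ fuel ih =>
    intro start e hk h0 hlen
    by_cases hge : e ≥ start
    · have hmid := PySem.Int.floordiv_two_mid_bounds (show start ≤ e by omega)
      set mid := PySem.Int.floordiv (start + e) 2 with hmiddef
      have hget : PySem.List.pyGet? tmp mid = some (tmp[mid.toNat]'(by omega)) :=
        PySem.List.pyGet?_eq_some_getElem tmp (by omega) (by omega)
      have hv : tmp[mid.toNat]'(by omega) > t :=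
        h _ (List.getElem_mem (l := tmp) (n := mid.toNat) (h := by omega))
      have hstep : bisertLoop tmp t (fuel + 1) start e = bisertLoop tmp t fuel start (mid - 1) := by
        simp only [bisertLoop]
        rw [if_pos hge, ← hmiddef, hget]
        simp [hv]
      rw [hstep]
      exact ih start (mid - 1) (by omega) h0 (by omega)
    · have hstep : bisertLoop tmp t (fuel + 1) start e = start := by
        simp only [bisertLoop]
        rw [if_neg hge]
      exact hstep

-- the backward walk stops immediately when no element equals t
theorem back_stop (tmp : List Int) (t idx : Int) (h : ∀ x ∈ tmp, x ≠ t)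
    (hidx : idx < (tmp.length : Int)) (fuel : Nat) : bisertBack tmp t (fuel + 1) idx = idx := by
  by_cases hge : idx ≥ 0
  · have hget : PySem.List.pyGet? tmp idx = some (tmp[idx.toNat]'(by omega)) :=
      PySem.List.pyGet?_eq_some_getElem tmp hge hidx
    simp only [bisertBack]
    rw [if_pos hge, hget]
    simp [h _ (List.getElem_mem (l := tmp) (n := idx.toNat) (h := by omega))]
  · simp only [bisertBack]
    rw [if_neg hge]

theorem altCount_all_lt (t : Int) : ∀ (tmp : List Int), (∀ x ∈ tmp, x < t) →
    altCount t tmp = (tmp.length : Int) := by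
  intro tmp
  induction tmp with
  | nil => intro _; simp [altCount]
  | cons x xs ih =>
    intro h
    have hx : x < t := h x (by simp)
    have := ih (fun y hy => h y (by simp [hy]))
    simp [altCount, hx, this]
    push_cast
    ring

theorem altCount_all_gt (t : Int) (tmp : List Int) (h : ∀ x ∈ tmp, t < x) :
    altCount t tmp = 0 := by
  cases tmp with
  | nil => simp [altCount]
  | cons x xs =>
    have hx : ¬ x < t := by have := h x (by simp); omega
    simp [altCount, hx]

-- ===== VERDICT (by name: the statement is the Claim_ definition above) =====
theorem bisert_spec : Claim_equal_bisert := by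
  intro tmp t _hd hpre0
  unfold Spec_bisert bisert bisert_alt
  rcases hpre0 with hsort | hlt | hgt
  case inr.inl =>
    have hlt' : ∀ x ∈ tmp, x < t := by simpa using hlt
    have hS : bisertLoop tmp t (tmp.length + 1) 0 ((tmp.length : Int) - 1) = ((tmp.length : Int) - 1) + 1 :=
      loop_all_lt tmp t hlt' (tmp.length + 1) 0 ((tmp.length : Int) - 1) (by omega) (by omega) (by omega) (by omega)
    rw [hS]
    show bisertBack tmp t (tmp.length + 1) ((((tmp.length : Int) - 1) + 1) - 1) + 1 = altCount t tmp
    have hidx : (((tmp.length : Int) - 1) + 1) - 1 = (tmp.length : Int) - 1 := by ring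
    rw [hidx, back_stop tmp t ((tmp.length : Int) - 1) (fun x hx => by have := hlt' x hx; omega) (by omega) tmp.length]
    rw [altCount_all_lt t tmp hlt']
    ring
  case inr.inr =>
    have hgt' : ∀ x ∈ tmp, t < x := by simpa using hgt
    have hS : bisertLoop tmp t (tmp.length + 1) 0 ((tmp.length : Int) - 1) = 0 :=
      loop_all_gt tmp t hgt' (tmp.length + 1) 0 ((tmp.length : Int) - 1) (by omega) (by omega) (by omega)
    rw [hS]
    show bisertBack tmp t (tmp.length + 1) (0 - 1) + 1 = altCount t tmp
    rw [back_stop tmp t (0 - 1) (fun x hx => by have := hgt' x hx; omega) (by omega) tmp.length]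
    rw [altCount_all_gt t tmp hgt']
    ring
  have hpre := sortedb_pairwise tmp hsort
  obtain ⟨hS0, hSlen, hSpre, hSpost⟩ :=
    loop_spec tmp t hpre (tmp.length + 1) 0 ((tmp.length : Int) - 1)
      (by omega) (by omega) (by omega) (by omega)
      (by intro i hi h; exact absurd h (by omega))
      (by intro i hi h; exact absurd h (by omega))
  set S := bisertLoop tmp t (tmp.length + 1) 0 ((tmp.length : Int) - 1) with hSdef
  obtain ⟨hb1, hb2, hb3, hb4⟩ :=
    back_spec tmp t S hSlen (tmp.length + 1) (S - 1) (by omega) (by omega) (by omega)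
      (by intro i hi h1 h2; exact absurd h2 (by omega))
  set r := bisertBack tmp t (tmp.length + 1) (S - 1) with hrdef
  refine (altCount_eq t tmp (r + 1) (by omega) (by omega) ?_ ?_).symm
  · intro i hi hir
    rcases hb4 with hneg | ⟨hr0, hrl, hrne⟩
    · omega
    · have hrs : r < S := by omega
      have h1 : tmp[r.toNat]'(by omega) ≤ t := hSpre r.toNat (by omega) (by omega)
      have h2 : tmp[r.toNat]'(by omega) ≠ t := hrne (by omega)
      have h3 : tmp[i] ≤ tmp[r.toNat]'(by omega) :=
        sorted_getElem_le tmp hpre (by omega) (by omega)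
      omega
  · intro i hi hir
    by_cases hiS : (i : Int) < S
    · have := hb3 i hi (by omega) hiS
      omega
    · have := hSpost i hi (by omega)
      omega
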